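-- pv_equiv track=rewrite | github.com/researchartifacts/artifact_analysis | src/utils/citation_apis.py | extract_paper_doi
-- ===== SOURCE A (Python) =====
-- _DOI_PREFIXES_STRIP = ("https://doi.org/", "http://doi.org/")
--
-- def extract_paper_doi(paper_url: str | None) -> str:
--     """Extract a bare DOI from a paper_url value (``https://doi.org/…`` or bare).
--
--     Returns ``""`` if none found.
--     """
--     if not paper_url:
--         return ""
--     doi = paper_url.strip()
--     for prefix in _DOI_PREFIXES_STRIP:
--         if doi.lower().startswith(prefix):
--             doi = doi[len(prefix) :]
--             break
--     if doi.startswith("10.") and "/" in doi: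
--         return doi.rstrip(".,);")
--     return ""
-- ===== SOURCE B (Python) =====
-- import re
--
-- # One compiled regex does the whole job: optionally consume a DOI-URL prefix
-- # (case-insensitively, with backtracking to "no prefix" if the rest cannot match),
-- # lazily capture a DOI starting with "10.", and let the trailing class absorb
-- # the ".,);" suffix (the greedy rstrip).  DOTALL so newlines inside the DOI pass.
-- _DOI_RE = re.compile(r'(?:https?://doi\.org/)?(10\..*?)[.,);]*\Z',
--                      re.IGNORECASE | re.DOTALL)
--
-- def extract_paper_doi(paper_url):
--     if not paper_url:
--         return ""
--     m = _DOI_RE.match(paper_url.strip())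
--     if not m:
--         return ""
--     doi = m.group(1)
--     return doi if "/" in doi else ""
-- ===== Notes on version B (the rewrite author's own statement) =====
-- stated objective: idiomatic
-- what changed: The manual prefix loop, startswith checks, substring test and manual rstrip are replaced by a single compiled regular expression: an optional case-insensitive DOI-URL prefix with backtracking, a lazy capture starting at the DOI marker, and a trailing character class that absorbs the stripped punctuation, followed by one slash-membership check on the captured group.
import Mathlib
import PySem

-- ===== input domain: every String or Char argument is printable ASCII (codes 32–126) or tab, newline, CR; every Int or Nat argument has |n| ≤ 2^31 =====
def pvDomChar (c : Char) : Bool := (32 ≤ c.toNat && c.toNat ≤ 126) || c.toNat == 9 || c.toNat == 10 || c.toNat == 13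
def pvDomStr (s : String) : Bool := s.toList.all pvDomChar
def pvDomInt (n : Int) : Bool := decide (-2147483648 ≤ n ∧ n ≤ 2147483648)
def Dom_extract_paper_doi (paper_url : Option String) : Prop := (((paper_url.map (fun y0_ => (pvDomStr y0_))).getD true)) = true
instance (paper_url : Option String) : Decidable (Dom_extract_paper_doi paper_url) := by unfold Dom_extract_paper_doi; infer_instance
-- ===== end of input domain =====

-- B replaces A's prefix loop / startswith / rstrip chain by a single regular-expression
-- match (ported by hand below); objective: idiomatic, same cost.

-- ===== PORT A =====
-- hand port of Python str.rstrip(".,);") (PySem has no one-sided stripChars); exact: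
-- drop the maximal trailing run of '.', ',', ')', ';'
def pvClsChar (c : Char) : Bool := c = '.' || c = ',' || c = ')' || c = ';'

def pvRstripCls (s : List Char) : List Char :=
  ((s.reverse).dropWhile pvClsChar).reverse

def extract_paper_doi (paper_url : Option String) : String :=
  match paper_url with
  | none => ""                                   -- `if not paper_url` (None is falsy)
  | some s =>
    if s.toList.isEmpty then ""                  -- `if not paper_url` ("" is falsy)
    else
      let doi := PySem.Chars.strip s.toList
      -- `for prefix in _DOI_PREFIXES_STRIP: … break` — first match wins, tuple order kept
      let doi :=
        if PySem.Chars.startswith (PySem.Chars.lower doi) ("https://doi.org/".toList)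
        then PySem.List.slice doi (some 16) none
        else if PySem.Chars.startswith (PySem.Chars.lower doi) ("http://doi.org/".toList)
        then PySem.List.slice doi (some 15) none
        else doi
      if PySem.Chars.startswith doi ("10.".toList) && PySem.Chars.isIn ("/".toList) doi
      then String.ofList (pvRstripCls doi)
      else ""

-- ===== PORT B =====
-- hand port of Source B's compiled regex r'(?:https?://doi\.org/)?(10\..*?)[.,);]*\Z'
-- with IGNORECASE|DOTALL, matched at the start of the string; exact on the domain.

-- consume the literal pattern `pat` case-insensitively (re.IGNORECASE, ASCII pattern)
def pvCiPrefix? (pat : List Char) (t : List Char) : Option (List Char) :=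
  match pat, t with
  | [], t => some t
  | _ :: _, [] => none
  | p :: ps, c :: cs => if PySem.Chars.lowerChar c = p then pvCiPrefix? ps cs else none

-- the lazy group `(…*?)` followed by `[.,);]*\Z`: the group grows one character at a
-- time until the rest of the input is entirely absorbed by the trailing class
def pvLazyCap (acc : List Char) (rest : List Char) : Option (List Char) :=
  if rest.all pvClsChar then some acc
  else
    match rest with
    | [] => none
    | c :: rs => pvLazyCap (acc ++ [c]) rs

-- `(10\..*?)[.,);]*\Z` at position t: the capture must begin with the literal "10."
def pvReCore (t : List Char) : Option (List Char) :=
  match t with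
  | '1' :: '0' :: '.' :: rest => pvLazyCap ['1', '0', '.'] rest
  | _ => none

-- the optional prefix `(?:https?://doi\.org/)?`: try `https` then `http` (the engine's
-- alternative order for `s?`); if the rest fails after a prefix, backtrack to no prefix
def pvReMatch (t : List Char) : Option (List Char) :=
  match pvCiPrefix? ("https://doi.org/".toList) t with
  | some r => (pvReCore r).orElse (fun _ => pvReCore t)
  | none =>
    match pvCiPrefix? ("http://doi.org/".toList) t with
    | some r => (pvReCore r).orElse (fun _ => pvReCore t)
    | none => pvReCore t

def extract_paper_doi_alt (paper_url : Option String) : String :=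
  match paper_url with
  | none => ""
  | some s =>
    if s.toList.isEmpty then ""
    else
      match pvReMatch (PySem.Chars.strip s.toList) with
      | none => ""
      | some doi =>
        -- `"/" in doi` for a one-character needle is character membership; exact
        if doi.contains '/' then String.ofList doi else ""

-- ===== PRECONDITION & SPEC =====
def Spec_extract_paper_doi (paper_url : Option String) (out : String) : Prop := out = extract_paper_doi_alt paper_url
instance (paper_url : Option String) (out : String) : Decidable (Spec_extract_paper_doi paper_url out) := by unfold Spec_extract_paper_doi; infer_instance

-- ===== CLAIM (what is proved, stated in full; the proofs are below) =====
def Claim_equal_extract_paper_doi : Prop := ∀ (paper_url : Option String), Dom_extract_paper_doi paper_url → Spec_extract_paper_doi paper_url (extract_paper_doi paper_url)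

-- ===== LEMMAS AND PROOFS =====

theorem rstripCls_of_all (u : List Char) (h : u.all pvClsChar) : pvRstripCls u = [] := by
  unfold pvRstripCls
  rw [List.dropWhile_eq_nil_iff.mpr (by simpa [List.all_eq_true, List.mem_reverse] using h)]
  simp

theorem rstripCls_cons (c : Char) (rs : List Char) (h : ¬ (c :: rs).all pvClsChar) :
    pvRstripCls (c :: rs) = c :: pvRstripCls rs := by
  unfold pvRstripCls
  rw [List.reverse_cons, List.dropWhile_append]
  by_cases hrs : (List.dropWhile pvClsChar rs.reverse).isEmpty
  · have hall : ∀ x ∈ rs.reverse, pvClsChar x := by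
      rw [← List.dropWhile_eq_nil_iff]; simpa [List.isEmpty_iff] using hrs
    have hc : pvClsChar c = false := by
      by_contra hb
      refine h ?_
      simp only [List.all_cons, Bool.and_eq_true, List.all_eq_true]
      exact ⟨by simpa using hb, fun x hx => hall x (List.mem_reverse.mpr hx)⟩
    simp only [hrs, if_true, List.dropWhile_cons, hc, Bool.false_eq_true, if_false,
      List.reverse_cons]
    rw [List.dropWhile_eq_nil_iff.mpr hall]
    simp
  · simp [hrs]

theorem lazyCap_eq (rest : List Char) : ∀ acc,
    pvLazyCap acc rest = some (acc ++ pvRstripCls rest) := by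
  induction rest with
  | nil => intro acc; simp [pvLazyCap, pvRstripCls]
  | cons c rs ih =>
    intro acc
    by_cases hall : (c :: rs).all pvClsChar
    · simp [pvLazyCap, hall, rstripCls_of_all _ hall]
    · rw [pvLazyCap, if_neg (by simpa using hall), ih, rstripCls_cons c rs hall]
      simp

theorem mem_rstripCls_iff (c : Char) (h : pvClsChar c = false) (u : List Char) :
    c ∈ pvRstripCls u ↔ c ∈ u := by
  unfold pvRstripCls
  constructor
  · intro hm
    have := (List.dropWhile_sublist (p := pvClsChar) (l := u.reverse)).mem (List.mem_reverse.mp hm)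
    exact List.mem_reverse.mp this
  · intro hm
    rw [List.mem_reverse]
    have : c ∈ u.reverse := List.mem_reverse.mpr hm
    rw [← List.takeWhile_append_dropWhile (p := pvClsChar) (l := u.reverse)] at this
    rcases List.mem_append.mp this with h1 | h1
    · exact absurd (List.mem_takeWhile_imp h1) (by simp [h])
    · exact h1

theorem reCore_eq (t : List Char) :
    pvReCore t = if ("10.".toList).isPrefixOf t
                 then some ('1' :: '0' :: '.' :: pvRstripCls (t.drop 3)) else none := by
  match t with
  | [] => simp [pvReCore]
  | [a] => simp [pvReCore]
  | [a, b] => simp [pvReCore]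
  | a :: b :: d :: rest =>
    unfold pvReCore
    split
    · rename_i t' rest' heq
      simp_all [List.isPrefixOf, lazyCap_eq]
    · rename_i hne
      rw [if_neg]
      intro hp
      simp [List.isPrefixOf] at hp
      exact hne rest (by rw [hp.1, hp.2.1, hp.2.2])

theorem ciPrefix_eq (pat : List Char) : ∀ (t : List Char),
    pvCiPrefix? pat t = if pat.isPrefixOf (PySem.Chars.lower t)
                        then some (t.drop pat.length) else none := by
  induction pat with
  | nil => intro t; simp [pvCiPrefix?, List.isPrefixOf]
  | cons p ps ih =>
    intro t
    match t with
    | [] => simp [pvCiPrefix?, PySem.Chars.lower]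
    | c :: cs =>
      rw [pvCiPrefix?]
      simp only [PySem.Chars.lower, List.map_cons, List.isPrefixOf_cons₂]
      by_cases hc : PySem.Chars.lowerChar c = p
      · rw [if_pos hc, ih]
        simp [hc, PySem.Chars.lower]
      · rw [if_neg hc, if_neg]
        simp only [Bool.and_eq_true, beq_iff_eq]
        intro h
        exact absurd h.1.symm hc

-- `'/' in s` (Python) on the A side as list membership
theorem isIn_slash_iff (t : List Char) :
    PySem.Chars.isIn ("/".toList) t = true ↔ '/' ∈ t := by
  rw [PySem.Chars.isIn_iff_infix]
  constructor
  · intro ⟨u, v, huv⟩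
    subst huv; simp
  · intro hm
    obtain ⟨u, v, huv⟩ := List.append_of_mem hm
    exact ⟨u, v, by simp [huv]⟩

-- the regex tail on t equals A's startswith/'in'/rstrip check on t
theorem core_match (t : List Char) :
    (match pvReCore t with
     | none => ""
     | some doi => if doi.contains '/' then String.ofList doi else "")
    = (if PySem.Chars.startswith t ("10.".toList) && PySem.Chars.isIn ("/".toList) t
       then String.ofList (pvRstripCls t) else "") := by
  rw [reCore_eq]
  by_cases hp : ("10.".toList).isPrefixOf t
  · rw [if_pos hp]
    obtain ⟨r, hr⟩ : ∃ r, t = '1' :: '0' :: '.' :: r := by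
      obtain ⟨v, hv⟩ := List.isPrefixOf_iff_prefix.mp hp
      exact ⟨v, by simpa using hv.symm⟩
    subst hr
    have hdrop : ('1' :: '0' :: '.' :: r).drop 3 = r := rfl
    rw [hdrop]
    have hsw : PySem.Chars.startswith ('1' :: '0' :: '.' :: r) ("10.".toList) = true := by
      simp [PySem.Chars.startswith]
    rw [hsw, Bool.true_and]
    have hslash : pvClsChar '/' = false := by decide
    by_cases hin : '/' ∈ r
    · have h1 : ¬ r.all pvClsChar := by
        simp only [List.all_eq_true, not_forall]
        exact ⟨'/', hin, by simp [hslash]⟩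
      have h2 : ¬ ('.' :: r).all pvClsChar := by
        simp only [List.all_cons, Bool.and_eq_true, not_and]
        exact fun _ => by simpa [List.all_eq_true] using h1
      have h3 : ¬ ('0' :: '.' :: r).all pvClsChar := by
        simp only [List.all_cons, Bool.and_eq_true, not_and]
        intro _; simpa [List.all_eq_true] using h2
      have h4 : ¬ ('1' :: '0' :: '.' :: r).all pvClsChar := by
        simp only [List.all_cons, Bool.and_eq_true, not_and]
        intro _; simpa [List.all_eq_true] using h3
      have hmemr : '/' ∈ pvRstripCls r := (mem_rstripCls_iff _ hslash _).mpr hin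
      have hcon : ('1' :: '0' :: '.' :: pvRstripCls r).contains '/' = true := by
        simp [List.contains_eq_mem, List.mem_cons, hmemr]
      have hisin : PySem.Chars.isIn ("/".toList) ('1' :: '0' :: '.' :: r) = true := by
        rw [isIn_slash_iff]; simp [hin]
      rw [hisin]
      simp only [hcon, if_true]
      rw [rstripCls_cons _ _ h4, rstripCls_cons _ _ h3, rstripCls_cons _ _ h2]
    · have hnotin : '/' ∉ ('1' :: '0' :: '.' :: r) := by
        simp only [List.mem_cons, not_or]
        exact ⟨by decide, by decide, by decide, hin⟩
      have hisin : PySem.Chars.isIn ("/".toList) ('1' :: '0' :: '.' :: r) = false := by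
        rw [Bool.eq_false_iff]
        intro hc
        exact hnotin ((isIn_slash_iff _).mp hc)
      have hmemr : '/' ∉ pvRstripCls r := fun hc => hin ((mem_rstripCls_iff _ hslash _).mp hc)
      have hcon : ('1' :: '0' :: '.' :: pvRstripCls r).contains '/' = false := by
        have hm : '/' ∉ ('1' :: '0' :: '.' :: pvRstripCls r) := by
          simp only [List.mem_cons, not_or]
          exact ⟨by decide, by decide, by decide, hmemr⟩
        simpa [List.contains_eq_mem] using hm
      rw [hisin]
      simp [List.contains_eq_mem, hmemr]
  · rw [if_neg hp]
    have hsw : PySem.Chars.startswith t (['1', '0', '.']) = false := by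
      rw [Bool.eq_false_iff]
      intro hc
      exact hp (by simpa [PySem.Chars.startswith] using hc)
    simp [show ("10.".toList) = ['1', '0', '.'] from rfl, hsw]

-- a string whose lowercasing starts with 'h' cannot match the '10.' core
theorem reCore_of_h (t : List Char) (c : Char) (cs : List Char) (ht : t = c :: cs)
    (hc : PySem.Chars.lowerChar c = 'h') : pvReCore t = none := by
  subst ht
  rw [reCore_eq, if_neg]
  intro hp
  have h1 : c = '1' := by
    obtain ⟨v, hv⟩ := List.isPrefixOf_iff_prefix.mp hp
    simpa using congrArg (fun l => l.head?) hv.symm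
  rw [h1] at hc
  exact absurd hc (by decide)

theorem head_lower_h (t : List Char) (pre : List Char) (hpre : pre.head? = some 'h')
    (h : pre.isPrefixOf (PySem.Chars.lower t) = true) :
    ∃ c cs, t = c :: cs ∧ PySem.Chars.lowerChar c = 'h' := by
  obtain ⟨v, hv⟩ := List.isPrefixOf_iff_prefix.mp h
  cases t with
  | nil =>
    simp [PySem.Chars.lower] at hv
    rw [hv.1] at hpre
    simp at hpre
  | cons c cs =>
    refine ⟨c, cs, rfl, ?_⟩
    have hh := congrArg (fun l => l.head?) hv
    cases pre with
    | nil => simp at hpre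
    | cons p ps =>
      simp [PySem.Chars.lower] at hh hpre
      rw [← hh]; exact hpre

-- the whole post-strip computation: A's prefix chain and check vs B's regex match
theorem body_eq (t : List Char) :
    (match pvReMatch t with
     | none => ""
     | some doi => if doi.contains '/' then String.ofList doi else "")
    = (let d := if PySem.Chars.startswith (PySem.Chars.lower t) ("https://doi.org/".toList)
                then PySem.List.slice t (some 16) none
                else if PySem.Chars.startswith (PySem.Chars.lower t) ("http://doi.org/".toList)
                then PySem.List.slice t (some 15) none
                else t
       if PySem.Chars.startswith d ("10.".toList) && PySem.Chars.isIn ("/".toList) d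
       then String.ofList (pvRstripCls d) else "") := by
  unfold pvReMatch
  rw [ciPrefix_eq, ciPrefix_eq]
  by_cases h1 : ("https://doi.org/".toList).isPrefixOf (PySem.Chars.lower t)
  · rw [if_pos h1]
    have hsw1 : PySem.Chars.startswith (PySem.Chars.lower t) ("https://doi.org/".toList) = true := by
      simpa [PySem.Chars.startswith] using h1
    have hslice : PySem.List.slice t (some 16) none = t.drop 16 := by
      rw [PySem.List.slice_from t (by norm_num : (0:Int) ≤ 16)]; simp
    obtain ⟨c, cs, hcs, hch⟩ := head_lower_h t _ (by decide) h1
    have hcore : pvReCore t = none := reCore_of_h t c cs hcs hch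
    simp only [hsw1, if_true, hslice]
    rw [← core_match (t.drop 16)]
    show (match (pvReCore (t.drop 16)).orElse (fun _ => pvReCore t) with
          | none => ""
          | some doi => if doi.contains '/' then String.ofList doi else "")
        = _
    cases hcr : pvReCore (t.drop 16) with
    | none => simp [hcore]
    | some g => simp
  · rw [if_neg h1]
    have hsw1 : PySem.Chars.startswith (PySem.Chars.lower t) ("https://doi.org/".toList) = false := by
      rw [Bool.eq_false_iff]
      intro hc
      exact h1 (by simpa [PySem.Chars.startswith] using hc)
    by_cases h2 : ("http://doi.org/".toList).isPrefixOf (PySem.Chars.lower t)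
    · rw [if_pos h2]
      have hsw2 : PySem.Chars.startswith (PySem.Chars.lower t) ("http://doi.org/".toList) = true := by
        simpa [PySem.Chars.startswith] using h2
      have hslice : PySem.List.slice t (some 15) none = t.drop 15 := by
        rw [PySem.List.slice_from t (by norm_num : (0:Int) ≤ 15)]; simp
      obtain ⟨c, cs, hcs, hch⟩ := head_lower_h t _ (by decide) h2
      have hcore : pvReCore t = none := reCore_of_h t c cs hcs hch
      simp only [hsw1, Bool.false_eq_true, if_false, hsw2, if_true, hslice]
      rw [← core_match (t.drop 15)]
      show (match (pvReCore (t.drop 15)).orElse (fun _ => pvReCore t) with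
            | none => ""
            | some doi => if doi.contains '/' then String.ofList doi else "")
          = _
      cases hcr : pvReCore (t.drop 15) with
      | none => simp [hcore]
      | some g => simp
    · rw [if_neg h2]
      have hsw2 : PySem.Chars.startswith (PySem.Chars.lower t) ("http://doi.org/".toList) = false := by
        rw [Bool.eq_false_iff]
        intro hc
        exact h2 (by simpa [PySem.Chars.startswith] using hc)
      simp only [hsw1, hsw2, Bool.false_eq_true, if_false]
      exact core_match t

-- ===== VERDICT (by name: the statement is the Claim_ definition above) =====
theorem extract_paper_doi_spec : Claim_equal_extract_paper_doi := by
  intro paper_url _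
  cases paper_url with
  | none => rfl
  | some s =>
    simp only [Spec_extract_paper_doi, extract_paper_doi, extract_paper_doi_alt]
    by_cases he : s.toList.isEmpty
    · simp [he]
    · rw [if_neg he, if_neg he]
      exact (body_eq (PySem.Chars.strip s.toList)).symm
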